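-- pv_equiv track=rewrite | github.com/bdzyubak/Challenge-Problems | HackerRank/bombermans_game_if_then.py | make_inverted
-- ===== SOURCE A (Python) =====
-- def make_full_grid(grid,rows,columns):
--
--     new_grid = list()
--     for _ in range(rows):
--         new_grid.append(['O']*columns)
--     return new_grid
--
-- def make_inverted(grid,rows,columns):
--     new_grid = make_full_grid(grid,rows,columns)
--     for row in range(rows):
--         for col in range(columns):
--             neighbors = [grid[row][col],grid[max(row-1,0)][col],grid[min(row+1,rows-1)][col],
--                         grid[row][max(col-1,0)],grid[row][min(col+1,columns-1)]]
--             if any(elem for elem in neighbors if elem == 'O'):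
--                 new_grid[row][col] = '.'
--     return new_grid
-- ===== SOURCE B (Python) =====
-- def make_inverted(grid, rows, columns):
--     # Scatter: start all 'O'; every 'O' cell stamps '.' on itself and its in-bounds neighbors.
--     new_grid = [['O'] * columns for _ in range(rows)]
--     for r in range(rows):
--         for c in range(columns):
--             if grid[r][c] == 'O':
--                 new_grid[r][c] = '.'
--                 if r - 1 >= 0:
--                     new_grid[r - 1][c] = '.'
--                 if r + 1 < rows:
--                     new_grid[r + 1][c] = '.'
--                 if c - 1 >= 0:
--                     new_grid[r][c - 1] = '.'
--                 if c + 1 < columns: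
--                     new_grid[r][c + 1] = '.'
--     return new_grid
-- ===== Notes on version B (the rewrite author's own statement) =====
-- stated objective: alternative
-- what changed: A gathers: each cell reads its clamped 5-cell neighborhood of the input; B scatters: the output starts all 'O' and each 'O' input cell stamps '.' on itself and its in-bounds orthogonal neighbors, reversing the read/write direction of the traversal.
import Mathlib
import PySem

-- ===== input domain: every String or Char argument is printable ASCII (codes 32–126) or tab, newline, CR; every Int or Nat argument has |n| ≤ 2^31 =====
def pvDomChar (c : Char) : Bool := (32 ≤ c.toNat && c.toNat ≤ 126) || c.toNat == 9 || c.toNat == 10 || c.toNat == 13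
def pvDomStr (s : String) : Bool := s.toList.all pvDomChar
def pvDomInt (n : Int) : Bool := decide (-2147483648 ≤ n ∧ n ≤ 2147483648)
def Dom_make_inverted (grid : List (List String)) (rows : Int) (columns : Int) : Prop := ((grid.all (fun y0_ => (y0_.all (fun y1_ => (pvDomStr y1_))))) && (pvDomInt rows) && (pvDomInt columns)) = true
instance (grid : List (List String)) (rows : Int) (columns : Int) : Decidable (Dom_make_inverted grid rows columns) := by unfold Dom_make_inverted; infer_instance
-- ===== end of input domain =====

-- B replaces A's per-cell gather over a clamped neighborhood by a scatter: each 'O' stamps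
-- '.' on itself and its in-bounds neighbors (objective: alternative, same cost).

-- ===== PORT A =====
-- grid[r][c] with two pyGetD reads; on Pre_ every read A performs is in range.
def pvCell (g : List (List String)) (r c : Int) : String :=
  PySem.List.pyGetD (PySem.List.pyGetD g r []) c ""

-- new_grid[r][c] = v (both indices nonnegative wherever the ports write)
def pvSet2 (g : List (List String)) (r c : Nat) (v : String) : List (List String) :=
  g.set r ((g.getD r []).set c v)

def make_full_grid (grid : List (List String)) (rows columns : Int) : List (List String) :=
  (PySem.List.pyRange 0 rows 1).foldl
    (fun ng _ => ng ++ [List.replicate columns.toNat "O"]) []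

def make_inverted (grid : List (List String)) (rows : Int) (columns : Int) : List (List String) :=
  (PySem.List.pyRange 0 rows 1).foldl (fun ng row =>
    (PySem.List.pyRange 0 columns 1).foldl (fun ng col =>
      let neighbors := [pvCell grid row col, pvCell grid (max (row-1) 0) col,
                        pvCell grid (min (row+1) (rows-1)) col,
                        pvCell grid row (max (col-1) 0), pvCell grid row (min (col+1) (columns-1))]
      if neighbors.any (fun e => e == "O") then pvSet2 ng row.toNat col.toNat "." else ng) ng)
    (make_full_grid grid rows columns)

-- ===== PORT B =====
def make_inverted_alt (grid : List (List String)) (rows : Int) (columns : Int) : List (List String) :=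
  (PySem.List.pyRange 0 rows 1).foldl (fun ng r =>
    (PySem.List.pyRange 0 columns 1).foldl (fun ng c =>
      if pvCell grid r c == "O" then
        let ng1 := pvSet2 ng r.toNat c.toNat "."
        let ng2 := if r - 1 ≥ 0 then pvSet2 ng1 (r-1).toNat c.toNat "." else ng1
        let ng3 := if r + 1 < rows then pvSet2 ng2 (r+1).toNat c.toNat "." else ng2
        let ng4 := if c - 1 ≥ 0 then pvSet2 ng3 r.toNat (c-1).toNat "." else ng3
        if c + 1 < columns then pvSet2 ng4 r.toNat (c+1).toNat "." else ng4
      else ng) ng)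
    (List.replicate rows.toNat (List.replicate columns.toNat "O"))

-- ===== PRECONDITION & SPEC =====
-- Pre_ excludes exactly the inputs on which Python A raises IndexError: a positive
-- rows/columns count exceeding the actual grid/row lengths in the traversed region.
def Pre_make_inverted (grid : List (List String)) (rows : Int) (columns : Int) : Prop :=
  rows ≤ 0 ∨ columns ≤ 0 ∨
    (rows ≤ (grid.length : Int) ∧ ∀ row ∈ grid.take rows.toNat, columns ≤ (row.length : Int))
instance (grid : List (List String)) (rows : Int) (columns : Int) : Decidable (Pre_make_inverted grid rows columns) := by unfold Pre_make_inverted; infer_instance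
def pvWitness_make_inverted : List (List String) × Int × Int :=
  ([["O", "."], [".", "."]], 2, 2)
def Spec_make_inverted (grid : List (List String)) (rows : Int) (columns : Int) (out : List (List String)) : Prop := out = make_inverted_alt grid rows columns
instance (grid : List (List String)) (rows : Int) (columns : Int) (out : List (List String)) : Decidable (Spec_make_inverted grid rows columns out) := by unfold Spec_make_inverted; infer_instance

-- ===== CLAIM (what is proved, stated in full; the proofs are below) =====
def Claim_equal_make_inverted : Prop := ∀ (grid : List (List String)) (rows : Int) (columns : Int), Dom_make_inverted grid rows columns → Pre_make_inverted grid rows columns → Spec_make_inverted grid rows columns (make_inverted grid rows columns)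


-- ===== LEMMAS AND PROOFS =====

-- grid shape, entry access, and applying a list of '.'-writes
def pvEntry (g : List (List String)) (r c : Nat) : String := (g.getD r []).getD c ""

def pvShape (g : List (List String)) (M N : Nat) : Prop :=
  g.length = M ∧ ∀ row ∈ g, row.length = N

def pvApply (ws : List (Nat × Nat)) (g : List (List String)) : List (List String) :=
  ws.foldl (fun g p => pvSet2 g p.1 p.2 ".") g

-- the write set of A's loop body at (r, c)
def pvWA (grid : List (List String)) (rows columns : Int) (r c : Int) : List (Nat × Nat) :=
  if ([pvCell grid r c, pvCell grid (max (r-1) 0) c, pvCell grid (min (r+1) (rows-1)) c,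
       pvCell grid r (max (c-1) 0), pvCell grid r (min (c+1) (columns-1))].any (fun e => e == "O"))
  then [(r.toNat, c.toNat)] else []

-- the write set of B's loop body at (r, c)
def pvWB (grid : List (List String)) (rows columns : Int) (r c : Int) : List (Nat × Nat) :=
  if pvCell grid r c == "O" then
    [(r.toNat, c.toNat)] ++ (if r - 1 ≥ 0 then [((r-1).toNat, c.toNat)] else [])
      ++ (if r + 1 < rows then [((r+1).toNat, c.toNat)] else [])
      ++ (if c - 1 ≥ 0 then [(r.toNat, (c-1).toNat)] else [])
      ++ (if c + 1 < columns then [(r.toNat, (c+1).toNat)] else [])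
  else []

theorem pvShape_set2 (g : List (List String)) (M N : Nat) (r c : Nat) (v : String)
    (h : pvShape g M N) : pvShape (pvSet2 g r c v) M N := by
  obtain ⟨hl, hrow⟩ := h
  by_cases hr : r < g.length
  · refine ⟨by simp [pvSet2, hl], ?_⟩
    intro row hmem
    rcases List.mem_or_eq_of_mem_set hmem with hm | rfl
    · exact hrow _ hm
    · rw [List.length_set, List.getD_eq_getElem g [] hr]
      exact hrow _ (List.getElem_mem hr)
  · rw [pvSet2, List.set_eq_of_length_le (by omega)]
    exact ⟨hl, hrow⟩

theorem pvEntry_set2 (g : List (List String)) (M N : Nat) (r c r' c' : Nat) (v : String)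
    (h : pvShape g M N) (hr : r < M) (hc : c < N) :
    pvEntry (pvSet2 g r' c' v) r c = if r' = r ∧ c' = c then v else pvEntry g r c := by
  obtain ⟨hl, hrow⟩ := h
  have hrg : r < g.length := by omega
  have hrowlen : (g.getD r []).length = N := by
    rw [List.getD_eq_getElem g [] hrg]; exact hrow _ (List.getElem_mem hrg)
  by_cases hr' : r' = r
  · subst hr'
    have hget : (pvSet2 g r' c' v).getD r' [] = (g.getD r' []).set c' v := by
      rw [pvSet2, List.getD_eq_getElem?_getD, List.getElem?_set_self hrg, Option.getD_some]
    by_cases hc' : c' = c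
    · subst hc'
      simp only [pvEntry, hget, and_self, if_true]
      rw [List.getD_eq_getElem?_getD, List.getElem?_set_self (by omega), Option.getD_some]
    · simp only [pvEntry, hget, hc', and_false, if_false]
      rw [List.getD_eq_getElem?_getD, List.getElem?_set_ne (by omega),
        ← List.getD_eq_getElem?_getD]
  · have hget : (pvSet2 g r' c' v).getD r [] = g.getD r [] := by
      rw [pvSet2, List.getD_eq_getElem?_getD, List.getElem?_set_ne (by omega),
        ← List.getD_eq_getElem?_getD]
    have hcond : ¬ (r' = r ∧ c' = c) := fun hh => hr' hh.1
    rw [if_neg hcond]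
    simp only [pvEntry, hget]

theorem pvShape_apply (ws : List (Nat × Nat)) (g : List (List String)) (M N : Nat)
    (h : pvShape g M N) : pvShape (pvApply ws g) M N := by
  induction ws generalizing g with
  | nil => exact h
  | cons p ws ih => exact ih _ (pvShape_set2 _ _ _ _ _ _ h)

theorem pvEntry_apply (ws : List (Nat × Nat)) (g : List (List String)) (M N : Nat) (r c : Nat)
    (h : pvShape g M N) (hr : r < M) (hc : c < N) :
    pvEntry (pvApply ws g) r c = if (r, c) ∈ ws then "." else pvEntry g r c := by
  induction ws generalizing g with
  | nil => simp [pvApply]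
  | cons p ws ih =>
    have hstep : pvApply (p :: ws) g = pvApply ws (pvSet2 g p.1 p.2 ".") := rfl
    rw [hstep, ih _ (pvShape_set2 _ _ _ _ _ _ h), pvEntry_set2 _ _ _ _ _ _ _ _ h hr hc]
    by_cases hm : (r, c) ∈ ws
    · simp [hm]
    · by_cases hp : p = (r, c)
      · subst hp; simp [hm]
      · have h1 : ¬ (p.1 = r ∧ p.2 = c) := by
          intro hh; exact hp (Prod.ext hh.1 hh.2)
        have h2 : ¬ (r, c) = p := fun e => hp e.symm
        simp [hm, h1, h2]

theorem pvExt (g1 g2 : List (List String)) (M N : Nat)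
    (h1 : pvShape g1 M N) (h2 : pvShape g2 M N)
    (he : ∀ r c, r < M → c < N → pvEntry g1 r c = pvEntry g2 r c) : g1 = g2 := by
  obtain ⟨hl1, hr1⟩ := h1
  obtain ⟨hl2, hr2⟩ := h2
  apply List.ext_getElem (by omega)
  intro i hi1 hi2
  have hni : i < M := by omega
  apply List.ext_getElem
  · rw [hr1 _ (List.getElem_mem hi1), hr2 _ (List.getElem_mem hi2)]
  intro j hj1 hj2
  have hnj : j < N := by rw [hr1 _ (List.getElem_mem hi1)] at hj1; omega
  have := he i j hni hnj
  simp only [pvEntry, List.getD_eq_getElem g1 [] hi1, List.getD_eq_getElem g2 [] hi2,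
    List.getD_eq_getElem _ "" hj1, List.getD_eq_getElem _ "" hj2] at this
  exact this

theorem pvFoldl_apply (W : Int → List (Nat × Nat)) (xs : List Int) (g : List (List String)) :
    xs.foldl (fun g x => pvApply (W x) g) g = pvApply (xs.flatMap W) g := by
  induction xs generalizing g with
  | nil => rfl
  | cons x xs ih =>
    rw [List.foldl_cons, ih]
    simp only [pvApply, List.flatMap_cons, List.foldl_append]

theorem pvFull (grid : List (List String)) (rows columns : Int) :
    make_full_grid grid rows columns
      = List.replicate rows.toNat (List.replicate columns.toNat "O") := by
  have key : ∀ (l : List Int) (init : List (List String)),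
      l.foldl (fun ng _ => ng ++ [List.replicate columns.toNat "O"]) init
        = init ++ List.replicate l.length (List.replicate columns.toNat "O") := by
    intro l
    induction l with
    | nil => simp
    | cons x xs ih =>
        intro init
        simp only [List.foldl_cons, ih, List.length_cons, List.append_assoc]
        simp [List.replicate_succ]
  rw [make_full_grid, key, PySem.List.length_pyRange_one]
  simp

theorem pvMemIte {α : Type} (p : Prop) [Decidable p] (l : List α) (a : α) :
    a ∈ (if p then l else []) ↔ p ∧ a ∈ l := by
  split <;> simp_all

theorem pvA_apply (grid : List (List String)) (rows columns : Int) :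
    make_inverted grid rows columns
      = pvApply ((PySem.List.pyRange 0 rows 1).flatMap (fun r =>
          (PySem.List.pyRange 0 columns 1).flatMap (fun c => pvWA grid rows columns r c)))
          (List.replicate rows.toNat (List.replicate columns.toNat "O")) := by
  rw [make_inverted, pvFull]
  have hfun : ∀ row : Int,
      (fun (ng : List (List String)) (col : Int) =>
        let neighbors := [pvCell grid row col, pvCell grid (max (row-1) 0) col,
                          pvCell grid (min (row+1) (rows-1)) col,
                          pvCell grid row (max (col-1) 0), pvCell grid row (min (col+1) (columns-1))]
        if neighbors.any (fun e => e == "O") then pvSet2 ng row.toNat col.toNat "." else ng)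
      = (fun ng col => pvApply (pvWA grid rows columns row col) ng) := by
    intro row
    funext ng col
    simp only [pvWA]
    split <;> simp [pvApply]
  have hin : (fun (ng : List (List String)) (row : Int) =>
      (PySem.List.pyRange 0 columns 1).foldl (fun ng col =>
        let neighbors := [pvCell grid row col, pvCell grid (max (row-1) 0) col,
                          pvCell grid (min (row+1) (rows-1)) col,
                          pvCell grid row (max (col-1) 0), pvCell grid row (min (col+1) (columns-1))]
        if neighbors.any (fun e => e == "O") then pvSet2 ng row.toNat col.toNat "." else ng) ng)
      = (fun ng row => pvApply ((PySem.List.pyRange 0 columns 1).flatMap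
          (fun c => pvWA grid rows columns row c)) ng) := by
    funext ng row
    rw [hfun row, pvFoldl_apply]
  rw [hin, pvFoldl_apply]

theorem pvB_apply (grid : List (List String)) (rows columns : Int) :
    make_inverted_alt grid rows columns
      = pvApply ((PySem.List.pyRange 0 rows 1).flatMap (fun r =>
          (PySem.List.pyRange 0 columns 1).flatMap (fun c => pvWB grid rows columns r c)))
          (List.replicate rows.toNat (List.replicate columns.toNat "O")) := by
  rw [make_inverted_alt]
  have hfun : ∀ r : Int,
      (fun (ng : List (List String)) (c : Int) =>
        if pvCell grid r c == "O" then
          let ng1 := pvSet2 ng r.toNat c.toNat "."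
          let ng2 := if r - 1 ≥ 0 then pvSet2 ng1 (r-1).toNat c.toNat "." else ng1
          let ng3 := if r + 1 < rows then pvSet2 ng2 (r+1).toNat c.toNat "." else ng2
          let ng4 := if c - 1 ≥ 0 then pvSet2 ng3 r.toNat (c-1).toNat "." else ng3
          if c + 1 < columns then pvSet2 ng4 r.toNat (c+1).toNat "." else ng4
        else ng)
      = (fun ng c => pvApply (pvWB grid rows columns r c) ng) := by
    intro r
    funext ng c
    simp only [pvWB]
    split
    · split_ifs <;> simp [pvApply]
    · simp [pvApply]
  have hin : (fun (ng : List (List String)) (r : Int) =>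
      (PySem.List.pyRange 0 columns 1).foldl (fun ng c =>
        if pvCell grid r c == "O" then
          let ng1 := pvSet2 ng r.toNat c.toNat "."
          let ng2 := if r - 1 ≥ 0 then pvSet2 ng1 (r-1).toNat c.toNat "." else ng1
          let ng3 := if r + 1 < rows then pvSet2 ng2 (r+1).toNat c.toNat "." else ng2
          let ng4 := if c - 1 ≥ 0 then pvSet2 ng3 r.toNat (c-1).toNat "." else ng3
          if c + 1 < columns then pvSet2 ng4 r.toNat (c+1).toNat "." else ng4
        else ng) ng)
      = (fun ng r => pvApply ((PySem.List.pyRange 0 columns 1).flatMap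
          (fun c => pvWB grid rows columns r c)) ng) := by
    funext ng r
    rw [hfun r, pvFoldl_apply]
  rw [hin, pvFoldl_apply]

-- membership in A's write list: the clamped gather condition at (rn, cn)
theorem pvMemA (grid : List (List String)) (rows columns : Int) (rn cn : Nat)
    (hr : rn < rows.toNat) (hc : cn < columns.toNat) :
    ((rn, cn) ∈ (PySem.List.pyRange 0 rows 1).flatMap (fun r =>
        (PySem.List.pyRange 0 columns 1).flatMap (fun c => pvWA grid rows columns r c))
      ↔ (pvCell grid rn cn = "O" ∨ pvCell grid (max ((rn:Int)-1) 0) cn = "O" ∨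
         pvCell grid (min ((rn:Int)+1) (rows-1)) cn = "O" ∨
         pvCell grid (rn:Int) (max ((cn:Int)-1) 0) = "O" ∨
         pvCell grid (rn:Int) (min ((cn:Int)+1) (columns-1)) = "O")) := by
  constructor
  · intro h
    rcases List.mem_flatMap.1 h with ⟨r, hrmem, h2⟩
    rcases List.mem_flatMap.1 h2 with ⟨c, hcmem, h3⟩
    rw [PySem.List.mem_pyRange_one] at hrmem hcmem
    rw [pvWA, pvMemIte] at h3
    obtain ⟨hco, hmem⟩ := h3
    have hpair := List.mem_singleton.1 hmem
    have hre : r = (rn:Int) := by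
      have h1 := congrArg Prod.fst hpair
      simp only at h1
      omega
    have hce : c = (cn:Int) := by
      have h1 := congrArg Prod.snd hpair
      simp only at h1
      omega
    subst hre; subst hce
    simpa using hco
  · intro h
    refine List.mem_flatMap.2 ⟨(rn:Int), ?_, List.mem_flatMap.2 ⟨(cn:Int), ?_, ?_⟩⟩
    · rw [PySem.List.mem_pyRange_one]; omega
    · rw [PySem.List.mem_pyRange_one]; omega
    · rw [pvWA, pvMemIte]
      refine ⟨by simpa using h, by simp⟩

-- membership in B's write list: some in-bounds 'O' source stamps (rn, cn)
theorem pvMemB (grid : List (List String)) (rows columns : Int) (rn cn : Nat) :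
    ((rn, cn) ∈ (PySem.List.pyRange 0 rows 1).flatMap (fun r =>
        (PySem.List.pyRange 0 columns 1).flatMap (fun c => pvWB grid rows columns r c))
      ↔ ∃ ri ci : Int, 0 ≤ ri ∧ ri < rows ∧ 0 ≤ ci ∧ ci < columns ∧ pvCell grid ri ci = "O" ∧
          ((ri = rn ∧ ci = cn) ∨ (0 ≤ ri - 1 ∧ ri - 1 = rn ∧ ci = cn) ∨
           (ri + 1 < rows ∧ ri + 1 = rn ∧ ci = cn) ∨ (0 ≤ ci - 1 ∧ ri = rn ∧ ci - 1 = cn) ∨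
           (ci + 1 < columns ∧ ri = rn ∧ ci + 1 = cn))) := by
  constructor
  · intro h
    rcases List.mem_flatMap.1 h with ⟨r, hrmem, h2⟩
    rcases List.mem_flatMap.1 h2 with ⟨c, hcmem, h3⟩
    rw [PySem.List.mem_pyRange_one] at hrmem hcmem
    rw [pvWB] at h3
    split at h3
    case isTrue hco =>
      refine ⟨r, c, hrmem.1, hrmem.2, hcmem.1, hcmem.2, by simpa using hco, ?_⟩
      simp only [List.mem_append, List.mem_singleton, pvMemIte] at h3
      rcases h3 with ((((h4 | h4) | h4) | h4) | h4)
      · have h5 := congrArg Prod.fst h4; have h6 := congrArg Prod.snd h4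
        simp only at h5 h6
        exact Or.inl ⟨by omega, by omega⟩
      · obtain ⟨hb, h4⟩ := h4
        have h5 := congrArg Prod.fst h4
        have h6 := congrArg Prod.snd h4
        simp only at h5 h6
        exact Or.inr (Or.inl ⟨hb, by omega, by omega⟩)
      · obtain ⟨hb, h4⟩ := h4
        have h5 := congrArg Prod.fst h4
        have h6 := congrArg Prod.snd h4
        simp only at h5 h6
        exact Or.inr (Or.inr (Or.inl ⟨hb, by omega, by omega⟩))
      · obtain ⟨hb, h4⟩ := h4
        have h5 := congrArg Prod.fst h4
        have h6 := congrArg Prod.snd h4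
        simp only at h5 h6
        exact Or.inr (Or.inr (Or.inr (Or.inl ⟨hb, by omega, by omega⟩)))
      · obtain ⟨hb, h4⟩ := h4
        have h5 := congrArg Prod.fst h4
        have h6 := congrArg Prod.snd h4
        simp only at h5 h6
        exact Or.inr (Or.inr (Or.inr (Or.inr ⟨hb, by omega, by omega⟩)))
    case isFalse => simp at h3
  · rintro ⟨ri, ci, h0, h1, h2, h3, hcell, hd⟩
    refine List.mem_flatMap.2 ⟨ri, ?_, List.mem_flatMap.2 ⟨ci, ?_, ?_⟩⟩
    · rw [PySem.List.mem_pyRange_one]; exact ⟨h0, h1⟩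
    · rw [PySem.List.mem_pyRange_one]; exact ⟨h2, h3⟩
    · rw [pvWB, if_pos (by simpa using hcell)]
      simp only [List.mem_append, List.mem_singleton, pvMemIte]
      rcases hd with ⟨ha, hb⟩ | ⟨ha, hb, hc'⟩ | ⟨ha, hb, hc'⟩ | ⟨ha, hb, hc'⟩ | ⟨ha, hb, hc'⟩
      · exact Or.inl (Or.inl (Or.inl (Or.inl (by rw [Prod.mk.injEq]; omega))))
      · exact Or.inl (Or.inl (Or.inl (Or.inr ⟨ha, by rw [Prod.mk.injEq]; omega⟩)))
      · exact Or.inl (Or.inl (Or.inr ⟨by omega, by rw [Prod.mk.injEq]; omega⟩))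
      · exact Or.inl (Or.inr ⟨ha, by rw [Prod.mk.injEq]; omega⟩)
      · exact Or.inr ⟨ha, by rw [Prod.mk.injEq]; omega⟩

-- the heart: a cell's clamped gather fires iff some in-bounds scatter source stamps it
theorem pvMem_iff (grid : List (List String)) (rows columns : Int) (rn cn : Nat)
    (hr : rn < rows.toNat) (hc : cn < columns.toNat) :
    ((rn, cn) ∈ (PySem.List.pyRange 0 rows 1).flatMap (fun r =>
        (PySem.List.pyRange 0 columns 1).flatMap (fun c => pvWA grid rows columns r c))
      ↔ (rn, cn) ∈ (PySem.List.pyRange 0 rows 1).flatMap (fun r =>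
        (PySem.List.pyRange 0 columns 1).flatMap (fun c => pvWB grid rows columns r c))) := by
  rw [pvMemA grid rows columns rn cn hr hc, pvMemB]
  have hrb : (rn:Int) < rows := by omega
  have hcb : (cn:Int) < columns := by omega
  constructor
  · intro h
    rcases h with h | h | h | h | h
    · exact ⟨rn, cn, by omega, hrb, by omega, hcb, h, Or.inl ⟨rfl, rfl⟩⟩
    · by_cases h0 : (1:Int) ≤ rn
      · refine ⟨(rn:Int) - 1, cn, by omega, by omega, by omega, hcb,
          by rw [show ((rn:Int) - 1) = max ((rn:Int)-1) 0 by omega]; exact h, ?_⟩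
        exact Or.inr (Or.inr (Or.inl ⟨by omega, by omega, rfl⟩))
      · refine ⟨rn, cn, by omega, hrb, by omega, hcb,
          by rw [show ((rn:Int)) = max ((rn:Int)-1) 0 by omega]; exact h, Or.inl ⟨rfl, rfl⟩⟩
    · by_cases h0 : (rn:Int) + 1 < rows
      · refine ⟨(rn:Int) + 1, cn, by omega, by omega, by omega, hcb,
          by rw [show ((rn:Int) + 1) = min ((rn:Int)+1) (rows-1) by omega]; exact h, ?_⟩
        exact Or.inr (Or.inl ⟨by omega, by omega, rfl⟩)
      · refine ⟨rn, cn, by omega, hrb, by omega, hcb,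
          by rw [show ((rn:Int)) = min ((rn:Int)+1) (rows-1) by omega]; exact h, Or.inl ⟨rfl, rfl⟩⟩
    · by_cases h0 : (1:Int) ≤ cn
      · refine ⟨rn, (cn:Int) - 1, by omega, hrb, by omega, by omega,
          by rw [show ((cn:Int) - 1) = max ((cn:Int)-1) 0 by omega]; exact h, ?_⟩
        exact Or.inr (Or.inr (Or.inr (Or.inr ⟨by omega, rfl, by omega⟩)))
      · refine ⟨rn, cn, by omega, hrb, by omega, hcb,
          by rw [show ((cn:Int)) = max ((cn:Int)-1) 0 by omega]; exact h, Or.inl ⟨rfl, rfl⟩⟩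
    · by_cases h0 : (cn:Int) + 1 < columns
      · refine ⟨rn, (cn:Int) + 1, by omega, hrb, by omega, by omega,
          by rw [show ((cn:Int) + 1) = min ((cn:Int)+1) (columns-1) by omega]; exact h, ?_⟩
        exact Or.inr (Or.inr (Or.inr (Or.inl ⟨by omega, rfl, by omega⟩)))
      · refine ⟨rn, cn, by omega, hrb, by omega, hcb,
          by rw [show ((cn:Int)) = min ((cn:Int)+1) (columns-1) by omega]; exact h, Or.inl ⟨rfl, rfl⟩⟩
  · rintro ⟨ri, ci, hr0, hr1, hc0, hc1, hcell, hd⟩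
    rcases hd with ⟨ha, hb⟩ | ⟨ha, hb, hc'⟩ | ⟨ha, hb, hc'⟩ | ⟨ha, hb, hc'⟩ | ⟨ha, hb, hc'⟩
    · exact Or.inl (by rw [show ((rn:Int)) = ri by omega, show ((cn:Int)) = ci by omega]; exact hcell)
    · -- source below: ri = rn + 1, its upward stamp; gather reads min (rn+1) (rows-1) = ri
      exact Or.inr (Or.inr (Or.inl (by
        rw [show (min ((rn:Int)+1) (rows-1)) = ri by omega, show ((cn:Int)) = ci by omega]
        exact hcell)))
    · -- source above: ri = rn - 1; gather reads max (rn-1) 0 = ri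
      exact Or.inr (Or.inl (by
        rw [show (max ((rn:Int)-1) 0) = ri by omega, show ((cn:Int)) = ci by omega]
        exact hcell))
    · exact Or.inr (Or.inr (Or.inr (Or.inr (by
        rw [show ((rn:Int)) = ri by omega, show (min ((cn:Int)+1) (columns-1)) = ci by omega]
        exact hcell))))
    · exact Or.inr (Or.inr (Or.inr (Or.inl (by
        rw [show ((rn:Int)) = ri by omega, show (max ((cn:Int)-1) 0) = ci by omega]
        exact hcell))))


-- ===== VERDICT (by name: the statement is the Claim_ definition above) =====
theorem make_inverted_spec : Claim_equal_make_inverted := by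
  intro grid rows columns _ _
  unfold Spec_make_inverted
  rw [pvA_apply, pvB_apply]
  have hsh : pvShape (List.replicate rows.toNat (List.replicate columns.toNat "O"))
      rows.toNat columns.toNat := by
    constructor
    · simp
    · intro row hrow
      rcases List.eq_of_mem_replicate hrow with rfl
      simp
  apply pvExt _ _ rows.toNat columns.toNat (pvShape_apply _ _ _ _ hsh) (pvShape_apply _ _ _ _ hsh)
  intro r c hr hc
  rw [pvEntry_apply _ _ _ _ _ _ hsh hr hc, pvEntry_apply _ _ _ _ _ _ hsh hr hc]
  have hiff := pvMem_iff grid rows columns r c hr hc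
  split_ifs with h1 h2 <;> tauto
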